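-- pv_equiv track=rewrite | github.com/miliar/Code_Jam_Webscraper | solutions_python/solutions_year17_round0_nr3/1082.py | solve
-- ===== SOURCE A (Python) =====
-- import math
--
-- def solve(N, K):
--     index = 0
--
--     while K >= pow(2, index):
--         index += 1
--
--     divider = pow(2, index)
--     remainder = K - pow(2, index-1)
--     s1 = math.floor((N - (divider - 1)) / divider)
--     s1Remainder = (N - (divider - 1)) % divider
--     s2 = s1 + math.floor(s1Remainder / pow(2, index-1))
--     s2Remainder = s1Remainder % pow(2, index-1)
--     if remainder < s2Remainder:
--         s1 += 1
--     return '' + str(max(s1, s2)) + ' ' + str(min(s1, s2))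
-- ===== SOURCE B (Python) =====
-- def solve(N, K):
--     # Simulate the seating process level by level, keeping segments grouped as
--     # (length, count) pairs in strictly decreasing length order.
--     def merge(kids):
--         if len(kids) >= 2 and kids[0][0] == kids[1][0]:
--             return merge([(kids[0][0], kids[0][1] + kids[1][1])] + kids[2:])
--         if kids:
--             return [kids[0]] + merge(kids[1:])
--         return []
--     level = [(N, 1)]
--     while True:
--         for X, c in level:
--             if K <= c:
--                 return str(X // 2) + ' ' + str((X - 1) // 2)
--             K -= c
--         level = merge([(y, c) for X, c in level for y in (X // 2, (X - 1) // 2)])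
-- ===== Notes on version B (the rewrite author's own statement) =====
-- stated objective: alternative
-- what changed: B simulates the splitting process level by level with grouped (length,count) segment runs instead of A's closed-form power-of-two/float arithmetic over the bit-length of K.
-- outside the precondition, e.g. on solve(5, 0): A returns '6 5', B returns '2 2'; on solve(5, -2): A returns '6 5', B returns '2 2'
import Mathlib
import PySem

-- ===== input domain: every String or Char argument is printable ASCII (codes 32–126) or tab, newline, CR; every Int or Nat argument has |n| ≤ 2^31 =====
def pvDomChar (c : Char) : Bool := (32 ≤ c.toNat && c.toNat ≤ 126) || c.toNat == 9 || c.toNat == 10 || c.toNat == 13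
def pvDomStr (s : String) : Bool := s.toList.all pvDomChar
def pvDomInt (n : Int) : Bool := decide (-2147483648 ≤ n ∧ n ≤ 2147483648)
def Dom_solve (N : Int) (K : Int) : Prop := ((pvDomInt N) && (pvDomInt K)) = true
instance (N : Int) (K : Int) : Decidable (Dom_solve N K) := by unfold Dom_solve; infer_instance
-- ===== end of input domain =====

-- B replaces A's closed-form power-of-two arithmetic by a level-by-level simulation of the
-- splitting process with grouped (length, count) segment runs (objective: alternative).

-- ===== PORT A =====
-- 'while K >= pow(2, index): index += 1'
def solveIndex (K : Int) (i : Nat) : Nat :=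
  if h : (2 : Int) ^ i ≤ K then solveIndex K (i + 1) else i
termination_by K.toNat + 1 - 2 ^ i
decreasing_by
  have h1 : (2 : Nat) ^ i < 2 ^ (i + 1) := Nat.pow_lt_pow_succ (by norm_num)
  have h2 : (2 : Nat) ^ i ≤ K.toNat := by
    have h0 : (0 : Int) ≤ K := le_trans (by positivity) h
    rw [Int.le_toNat h0]; push_cast; exact h
  omega

-- math.floor((…) / divider) is a float division by a power of two: exact on the stated domain,
-- ported as floor division.  For K ≤ 0 Python's pow(2, index-1) is the float 0.5 (index = 0);
-- that degenerate branch lies outside Pre_solve and the port's Nat 'index - 1' differs there.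
def solve (N : Int) (K : Int) : String :=
  let index := solveIndex K 0
  let divider : Int := 2 ^ index
  let remainder : Int := K - 2 ^ (index - 1)
  let s1 := PySem.Int.floordiv (N - (divider - 1)) divider
  let s1Remainder := PySem.Int.mod (N - (divider - 1)) divider
  let s2 := s1 + PySem.Int.floordiv s1Remainder ((2 : Int) ^ (index - 1))
  let s2Remainder := PySem.Int.mod s1Remainder ((2 : Int) ^ (index - 1))
  let s1' := if remainder < s2Remainder then s1 + 1 else s1
  "" ++ PySem.Int.toStr (max s1' s2) ++ " " ++ PySem.Int.toStr (min s1' s2)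

-- ===== PORT B =====
-- the 'for X, c in level' scan: returns (some answer, _) when person K sits in this level,
-- else (none, K minus the level's total count)
def seatScan : List (Int × Int) → Int → Option String × Int
  | [], K => (none, K)
  | (X, c) :: t, K =>
    if K ≤ c then
      (some (PySem.Int.toStr (PySem.Int.floordiv X 2) ++ " " ++
             PySem.Int.toStr (PySem.Int.floordiv (X - 1) 2)), K)
    else seatScan t (K - c)

-- '[(y, c) for X, c in level for y in (X // 2, (X - 1) // 2)]'
def kidsOf (level : List (Int × Int)) : List (Int × Int) :=
  level.flatMap (fun p =>
    [(PySem.Int.floordiv p.1 2, p.2), (PySem.Int.floordiv (p.1 - 1) 2, p.2)])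

-- 'merge': coalesce adjacent runs of equal length
def mergeAdj : List (Int × Int) → List (Int × Int)
  | (y1, c1) :: (y2, c2) :: t =>
    if y1 = y2 then mergeAdj ((y1, c1 + c2) :: t)
    else (y1, c1) :: mergeAdj ((y2, c2) :: t)
  | l => l
termination_by l => l.length

-- the 'while True' loop; the fuel only totalises it (K.toNat + 1 levels always suffice for K ≥ 1)
def loopB : Nat → List (Int × Int) → Int → String
  | 0, _, _ => ""
  | fuel + 1, level, K =>
    match seatScan level K with
    | (some out, _) => out
    | (none, K') => loopB fuel (mergeAdj (kidsOf level)) K'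

def solve_alt (N : Int) (K : Int) : String := loopB (K.toNat + 1) [(N, 1)] K

-- ===== PRECONDITION & SPEC =====
-- Pre_ excludes only K ≤ 0: outside the problem's 1-based occupant index, where A's while loop
-- never runs and its result comes from a degenerate float branch (pow(2, -1) = 0.5).
def Pre_solve (N : Int) (K : Int) : Prop := 1 ≤ K
instance (N : Int) (K : Int) : Decidable (Pre_solve N K) := by unfold Pre_solve; infer_instance

def pvWitness_solve : Int × Int := (7, 3)

def Spec_solve (N : Int) (K : Int) (out : String) : Prop := out = solve_alt N K
instance (N : Int) (K : Int) (out : String) : Decidable (Spec_solve N K out) := by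
  unfold Spec_solve; infer_instance

-- ===== CLAIM (what is proved, stated in full; the proofs are below) =====
def Claim_equal_solve : Prop :=
  ∀ (N : Int) (K : Int), Dom_solve N K → Pre_solve N K → Spec_solve N K (solve N K)

-- ===== LEMMAS AND PROOFS =====

-- the answer string printed when a segment of length X is split
def outStr (X : Int) : String :=
  PySem.Int.toStr (PySem.Int.floordiv X 2) ++ " " ++
  PySem.Int.toStr (PySem.Int.floordiv (X - 1) 2)

-- invariant shape of a level: R segments of length Q+1 followed by T - R of length Q
def shape (Q R T : Int) : List (Int × Int) :=
  if R = 0 then [(Q, T)] else [(Q + 1, R), (Q, T - R)]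

lemma mergeAdj_single (p : Int × Int) : mergeAdj [p] = [p] := by
  rcases p with ⟨y, c⟩
  rw [mergeAdj.eq_def]

lemma seat_shape (Q R T K : Int) (hR0 : 0 ≤ R) (hRT : R < T) (hK : 1 ≤ K) :
    seatScan (shape Q R T) K =
      if K ≤ R then (some (outStr (Q + 1)), K)
      else if K ≤ T then (some (outStr Q), K - R) else (none, K - T) := by
  unfold shape outStr
  by_cases hR : R = 0
  · subst hR
    rw [if_pos rfl, if_neg (by omega : ¬K ≤ (0 : Int))]
    simp only [seatScan]
    by_cases h2 : K ≤ T
    · rw [if_pos h2, if_pos h2]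
      congr 1
      omega
    · rw [if_neg h2, if_neg h2]
  · rw [if_neg hR]
    simp only [seatScan]
    by_cases h1 : K ≤ R
    · rw [if_pos h1, if_pos h1]
    · rw [if_neg h1, if_neg h1]
      by_cases h2 : K - R ≤ T - R
      · rw [if_pos h2, if_pos (by omega : K ≤ T)]
      · rw [if_neg h2, if_neg (by omega : ¬K ≤ T)]
        congr 1
        omega

lemma step_shape (Q R T : Int) (hR0 : 0 ≤ R) (hRT : R < T) :
    mergeAdj (kidsOf (shape Q R T)) =
      shape (PySem.Int.floordiv (Q - 1) 2)
        (if PySem.Int.mod Q 2 = 0 then T + R else R) (2 * T) := by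
  have h2 : (0 : Int) < 2 := by norm_num
  rcases Int.even_or_odd Q with ⟨a, ha⟩ | ⟨a, ha⟩
  · -- Q = 2a
    have e4 : PySem.Int.floordiv (Q - 1) 2 = a - 1 := by
      rw [PySem.Int.floordiv_eq_ediv_of_pos h2]; omega
    have em : PySem.Int.mod Q 2 = 0 := by
      rw [PySem.Int.mod_eq_emod_of_pos h2]; omega
    rw [e4, if_pos em]
    by_cases hR : R = 0
    · subst hR
      have hk : kidsOf (shape Q 0 T) = [(a, T), (a - 1, T)] := by
        rw [shape, if_pos rfl]
        simp [kidsOf]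
        omega
      rw [hk, mergeAdj, if_neg (by omega : ¬a = a - 1), mergeAdj_single,
        shape, if_neg (by omega : ¬T + 0 = 0)]
      simp only [List.cons.injEq, Prod.mk.injEq, and_true, true_and]
      omega
    · have hk : kidsOf (shape Q R T) = [(a, R), (a, R), (a, T - R), (a - 1, T - R)] := by
        rw [shape, if_neg hR]
        simp [kidsOf]
        omega
      rw [hk, mergeAdj, if_pos rfl, mergeAdj, if_pos rfl, mergeAdj,
        if_neg (by omega : ¬a = a - 1), mergeAdj_single,
        shape, if_neg (by omega : ¬T + R = 0)]
      simp only [List.cons.injEq, Prod.mk.injEq, and_true, true_and]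
      omega
  · -- Q = 2a + 1
    have e4 : PySem.Int.floordiv (Q - 1) 2 = a := by
      rw [PySem.Int.floordiv_eq_ediv_of_pos h2]; omega
    have em : ¬PySem.Int.mod Q 2 = 0 := by
      rw [PySem.Int.mod_eq_emod_of_pos h2]; omega
    rw [e4, if_neg em]
    by_cases hR : R = 0
    · subst hR
      have hk : kidsOf (shape Q 0 T) = [(a, T), (a, T)] := by
        rw [shape, if_pos rfl]
        simp [kidsOf]
        omega
      rw [hk, mergeAdj, if_pos rfl, mergeAdj_single, shape, if_pos rfl]
      simp only [List.cons.injEq, Prod.mk.injEq, and_true, true_and]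
      omega
    · have hk : kidsOf (shape Q R T) = [(a + 1, R), (a, R), (a, T - R), (a, T - R)] := by
        rw [shape, if_neg hR]
        simp [kidsOf]
        omega
      rw [hk, mergeAdj, if_neg (by omega : ¬a + 1 = a), mergeAdj, if_pos rfl,
        mergeAdj, if_pos rfl, mergeAdj_single, shape, if_neg hR]
      simp only [List.cons.injEq, Prod.mk.injEq, and_true, true_and]
      omega

lemma solveIndex_spec (K : Int) (d : Nat) (hlo : (2 : Int) ^ d ≤ K)
    (hhi : K < 2 ^ (d + 1)) : solveIndex K 0 = d + 1 := by
  suffices h : ∀ (m i : Nat), d + 1 = i + m → solveIndex K i = d + 1 by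
    exact h (d + 1) 0 (by omega)
  intro m
  induction m with
  | zero =>
    intro i hi
    have : i = d + 1 := by omega
    subst this
    rw [solveIndex, dif_neg (not_le.mpr hhi)]
  | succ m ih =>
    intro i hi
    have hile : i ≤ d := by omega
    have hle : (2 : Int) ^ i ≤ K :=
      le_trans (pow_le_pow_right₀ (by norm_num) hile) hlo
    rw [solveIndex, dif_pos hle]
    exact ih (i + 1) (by omega)

-- A's closed form at level d: person K (with 2^d ≤ K < 2^(d+1)) splits a segment of
-- length Q+1 if K - 2^d + 1 ≤ R, else one of length Q, where Q, R are the level-d parameters.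
lemma solve_closed (N K : Int) (d : Nat) (hlo : (2 : Int) ^ d ≤ K) (hhi : K < 2 ^ (d + 1)) :
    solve N K =
      if K - 2 ^ d + 1 ≤ (N - 2 ^ d + 1) % 2 ^ d then outStr ((N - 2 ^ d + 1) / 2 ^ d + 1)
      else outStr ((N - 2 ^ d + 1) / 2 ^ d) := by
  have hT : (0 : Int) < 2 ^ d := by positivity
  have hT2 : (0 : Int) < 2 ^ (d + 1) := by positivity
  obtain ⟨Q, R, hQdef, hRdef⟩ :
      ∃ Q R : Int, Q = (N - 2 ^ d + 1) / 2 ^ d ∧ R = (N - 2 ^ d + 1) % 2 ^ d :=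
    ⟨_, _, rfl, rfl⟩
  rw [← hQdef, ← hRdef]
  have hQR : N - 2 ^ d + 1 = 2 ^ d * Q + R := by
    rw [hQdef, hRdef]
    exact (Int.mul_ediv_add_emod (N - 2 ^ d + 1) (2 ^ d)).symm
  have hR0 : 0 ≤ R := by
    rw [hRdef]
    exact Int.emod_nonneg _ (ne_of_gt hT)
  have hRT : R < 2 ^ d := by
    rw [hRdef]
    exact Int.emod_lt_of_pos _ hT
  obtain ⟨a, b, hab, hb0, hb2⟩ :
      ∃ a b : Int, Q - 1 = 2 * a + b ∧ 0 ≤ b ∧ b < 2 :=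
    ⟨(Q - 1) / 2, (Q - 1) % 2, by omega, by omega, by omega⟩
  have hpow : (2 : Int) ^ (d + 1) = 2 * 2 ^ d := by rw [pow_succ]; ring
  have hbT0 : 0 ≤ b * 2 ^ d + R := by
    have := mul_nonneg hb0 (le_of_lt hT)
    omega
  have hbT1 : b * 2 ^ d + R < 2 * 2 ^ d := by
    have : b * 2 ^ d ≤ 1 * 2 ^ d := mul_le_mul_of_nonneg_right (by omega) (le_of_lt hT)
    omega
  have hM : N - (2 ^ (d + 1) - 1) = (b * 2 ^ d + R) + (2 * 2 ^ d) * a := by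
    rw [hpow]
    linear_combination hQR + (2 : Int) ^ d * hab
  have hidx := solveIndex_spec K d hlo hhi
  rw [solve]
  simp only [hidx, Nat.add_sub_cancel]
  rw [hM]
  have hne : (2 : Int) * 2 ^ d ≠ 0 := by positivity
  have es1 : PySem.Int.floordiv ((b * 2 ^ d + R) + 2 * 2 ^ d * a) (2 ^ (d + 1)) = a := by
    rw [hpow, PySem.Int.floordiv_eq_ediv_of_pos (by positivity),
      Int.add_mul_ediv_left _ _ hne, Int.ediv_eq_zero_of_lt hbT0 hbT1, zero_add]
  have es1R : PySem.Int.mod ((b * 2 ^ d + R) + 2 * 2 ^ d * a) (2 ^ (d + 1)) = b * 2 ^ d + R := by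
    rw [hpow, PySem.Int.mod_eq_emod_of_pos (by positivity), Int.add_mul_emod_self_left,
      Int.emod_eq_of_lt hbT0 hbT1]
  have es2 : PySem.Int.floordiv (b * 2 ^ d + R) (2 ^ d) = b := by
    rw [PySem.Int.floordiv_eq_ediv_of_pos hT, show b * 2 ^ d + R = R + 2 ^ d * b by ring,
      Int.add_mul_ediv_left _ _ (ne_of_gt hT), Int.ediv_eq_zero_of_lt hR0 hRT, zero_add]
  have es2R : PySem.Int.mod (b * 2 ^ d + R) (2 ^ d) = R := by
    rw [PySem.Int.mod_eq_emod_of_pos hT, show b * 2 ^ d + R = R + 2 ^ d * b by ring,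
      Int.add_mul_emod_self_left, Int.emod_eq_of_lt hR0 hRT]
  rw [es1, es1R, es2, es2R]
  by_cases hc : K - 2 ^ d + 1 ≤ R
  · rw [if_pos (by omega : K - 2 ^ d < R), if_pos hc]
    unfold outStr
    have c1 : PySem.Int.floordiv (Q + 1) 2 = max (a + 1) (a + b) := by
      rw [PySem.Int.floordiv_eq_ediv_of_pos (by norm_num)]; omega
    have c2 : PySem.Int.floordiv (Q + 1 - 1) 2 = min (a + 1) (a + b) := by
      rw [PySem.Int.floordiv_eq_ediv_of_pos (by norm_num)]; omega
    rw [c1, c2, String.empty_append]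
  · rw [if_neg (by omega : ¬K - 2 ^ d < R), if_neg hc]
    unfold outStr
    have c1 : PySem.Int.floordiv Q 2 = max a (a + b) := by
      rw [PySem.Int.floordiv_eq_ediv_of_pos (by norm_num)]; omega
    have c2 : PySem.Int.floordiv (Q - 1) 2 = min a (a + b) := by
      rw [PySem.Int.floordiv_eq_ediv_of_pos (by norm_num)]; omega
    rw [c1, c2, String.empty_append]

-- next-level parameters
lemma child_params (N : Int) (d : Nat) :
    (N - 2 ^ (d + 1) + 1) / 2 ^ (d + 1) =
        PySem.Int.floordiv ((N - 2 ^ d + 1) / 2 ^ d - 1) 2 ∧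
      (N - 2 ^ (d + 1) + 1) % 2 ^ (d + 1) =
        (if PySem.Int.mod ((N - 2 ^ d + 1) / 2 ^ d) 2 = 0
         then 2 ^ d + (N - 2 ^ d + 1) % 2 ^ d else (N - 2 ^ d + 1) % 2 ^ d) := by
  have hT : (0 : Int) < 2 ^ d := by positivity
  obtain ⟨Q, R, hQdef, hRdef⟩ :
      ∃ Q R : Int, Q = (N - 2 ^ d + 1) / 2 ^ d ∧ R = (N - 2 ^ d + 1) % 2 ^ d :=
    ⟨_, _, rfl, rfl⟩
  rw [← hQdef, ← hRdef]
  have hQR : N - 2 ^ d + 1 = 2 ^ d * Q + R := by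
    rw [hQdef, hRdef]
    exact (Int.mul_ediv_add_emod (N - 2 ^ d + 1) (2 ^ d)).symm
  have hR0 : 0 ≤ R := by
    rw [hRdef]
    exact Int.emod_nonneg _ (ne_of_gt hT)
  have hRT : R < 2 ^ d := by
    rw [hRdef]
    exact Int.emod_lt_of_pos _ hT
  have hpow : (2 : Int) ^ (d + 1) = 2 * 2 ^ d := by rw [pow_succ]; ring
  have hne : (2 : Int) * 2 ^ d ≠ 0 := by positivity
  rcases Int.even_or_odd Q with ⟨a, ha⟩ | ⟨a, ha⟩
  · -- Q = 2a : numerator = (2^d + R) + 2·2^d·(a - 1)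
    have ha2 : Q = 2 * a := by omega
    have hnum : N - 2 ^ (d + 1) + 1 = (2 ^ d + R) + 2 * 2 ^ d * (a - 1) := by
      rw [hpow]
      linear_combination hQR + (2 : Int) ^ d * ha2
    have hb0 : (0 : Int) ≤ 2 ^ d + R := by omega
    have hb1 : (2 : Int) ^ d + R < 2 * 2 ^ d := by omega
    have em : PySem.Int.mod Q 2 = 0 := by
      rw [PySem.Int.mod_eq_emod_of_pos (by norm_num)]; omega
    have ef : PySem.Int.floordiv (Q - 1) 2 = a - 1 := by
      rw [PySem.Int.floordiv_eq_ediv_of_pos (by norm_num)]; omega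
    refine ⟨?_, ?_⟩
    · rw [hnum, hpow, Int.add_mul_ediv_left _ _ hne, Int.ediv_eq_zero_of_lt hb0 hb1,
        zero_add, ef]
    · rw [hnum, hpow, Int.add_mul_emod_self_left, Int.emod_eq_of_lt hb0 hb1, if_pos em]
  · -- Q = 2a + 1 : numerator = R + 2·2^d·a
    have hnum : N - 2 ^ (d + 1) + 1 = R + 2 * 2 ^ d * a := by
      rw [hpow]
      linear_combination hQR + (2 : Int) ^ d * ha
    have em : ¬PySem.Int.mod Q 2 = 0 := by
      rw [PySem.Int.mod_eq_emod_of_pos (by norm_num)]; omega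
    have ef : PySem.Int.floordiv (Q - 1) 2 = a := by
      rw [PySem.Int.floordiv_eq_ediv_of_pos (by norm_num)]; omega
    refine ⟨?_, ?_⟩
    · rw [hnum, hpow, Int.add_mul_ediv_left _ _ hne,
        Int.ediv_eq_zero_of_lt hR0 (by omega : R < 2 * 2 ^ d), zero_add, ef]
    · rw [hnum, hpow, Int.add_mul_emod_self_left,
        Int.emod_eq_of_lt hR0 (by omega : R < 2 * 2 ^ d), if_neg em]

lemma loopB_shape (fuel : Nat) :
    ∀ (d : Nat) (N K K' : Int),
      K' = K - 2 ^ d + 1 → 1 ≤ K' → K'.toNat ≤ fuel →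
      loopB fuel (shape ((N - 2 ^ d + 1) / 2 ^ d) ((N - 2 ^ d + 1) % 2 ^ d) (2 ^ d)) K' =
        solve N K := by
  induction fuel with
  | zero => intro d N K K' hK' h1 hf; omega
  | succ fuel ih =>
    intro d N K K' hK' h1 hf
    have hT : (0 : Int) < 2 ^ d := by positivity
    have hR0 : 0 ≤ (N - 2 ^ d + 1) % 2 ^ d := Int.emod_nonneg _ (ne_of_gt hT)
    have hRT : (N - 2 ^ d + 1) % 2 ^ d < 2 ^ d := Int.emod_lt_of_pos _ hT
    have hpow : (2 : Int) ^ (d + 1) = 2 * 2 ^ d := by rw [pow_succ]; ring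
    rw [loopB, seat_shape _ _ _ _ hR0 hRT h1]
    by_cases hc1 : K' ≤ (N - 2 ^ d + 1) % 2 ^ d
    · rw [if_pos hc1]
      show outStr ((N - 2 ^ d + 1) / 2 ^ d + 1) = solve N K
      rw [solve_closed N K d (by omega) (by rw [hpow]; omega)]
      rw [if_pos (by omega)]
    · rw [if_neg hc1]
      by_cases hc2 : K' ≤ 2 ^ d
      · rw [if_pos hc2]
        show outStr ((N - 2 ^ d + 1) / 2 ^ d) = solve N K
        rw [solve_closed N K d (by omega) (by rw [hpow]; omega)]
        rw [if_neg (by omega)]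
      · rw [if_neg hc2]
        show loopB fuel (mergeAdj (kidsOf (shape _ _ _))) (K' - 2 ^ d) = solve N K
        rw [step_shape _ _ _ hR0 hRT]
        have hcp := child_params N d
        have hih := ih (d + 1) N K (K' - 2 ^ d) (by rw [hpow]; omega) (by omega) (by omega)
        rw [hcp.1, hcp.2] at hih
        rw [show (2 : Int) * 2 ^ d = 2 ^ (d + 1) from hpow.symm]
        exact hih

-- ===== VERDICT (by name: the statement is the Claim_ definition above) =====
theorem solve_spec : Claim_equal_solve := by
  intro N K _hDom hPre
  unfold Spec_solve
  have hPre' : (1 : Int) ≤ K := hPre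
  have h0 : solve_alt N K = loopB (K.toNat + 1) [(N, 1)] K := rfl
  have hsh : shape ((N - 2 ^ 0 + 1) / 2 ^ 0) ((N - 2 ^ 0 + 1) % 2 ^ 0) (2 ^ 0) = [(N, 1)] := by
    unfold shape
    norm_num
  have hmain := loopB_shape (K.toNat + 1) 0 N K K (by norm_num) hPre' (by omega)
  rw [hsh] at hmain
  rw [h0, hmain]
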